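-- pv_equiv track=rewrite | github.com/hussainbiedouh/windows-security-auditor | src/winsec_auditor/utils.py | parse_powershell_list_output
-- ===== SOURCE A (Python) =====
-- def parse_powershell_list_output(output: str, fields: list[str]) -> list[dict[str, str]]:
--     """Parse PowerShell Format-List output into structured data.
--
--     This function extracts structured data from PowerShell's Format-List
--     output, which typically looks like:
--
--         Name : value1
--         Status : value2
--
--         Name : value3
--         Status : value4
--
--     Args:
--         output: PowerShell Format-List output string
--         fields: List of field names to extract (order matters - first field
--                is used to detect new entries)
--
--     Returns:
--         List of dictionaries with field names as keys
--
--     Example: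
--         >>> output = '''Name : Service1
--         ... Status : Running
--         ...
--         ... Name : Service2
--         ... Status : Stopped'''
--         >>> parse_powershell_list_output(output, ['Name', 'Status'])
--         [{'Name': 'Service1', 'Status': 'Running'}, {'Name': 'Service2', 'Status': 'Stopped'}]
--     """
--     if not output or not output.strip():
--         return []
--
--     if not fields:
--         return []
--
--     lines = output.strip().split('\n')
--     entries = []
--     current_entry = {}
--     first_field = fields[0]
--
--     for line in lines:
--         line = line.strip()
--
--         # Skip empty lines and PowerShell prompt lines
--         if not line or line.startswith('PS '):
--             continue
--
--         # Check if this line starts with any of our target fields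
--         for field in fields:
--             if line.startswith(field) and ':' in line:
--                 # Found a field - if this is the first field and we have data, save it
--                 if field == first_field and current_entry:
--                     entries.append(current_entry)
--                     current_entry = {}
--
--                 # Extract value (everything after first colon)
--                 try:
--                     value = line.split(':', 1)[1].strip()
--                     current_entry[field] = value
--                 except IndexError:
--                     current_entry[field] = ''
--                 break
--
--     # Don't forget the last entry
--     if current_entry:
--         entries.append(current_entry)
--
--     return entries
-- ===== SOURCE B (Python) =====
-- def parse_powershell_list_output(output: str, fields: list[str]) -> list[dict[str, str]]:
--     """Three staged passes: extract (field, value) pairs, chunk them at first-field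
--     boundaries by appending to the last chunk, then turn each chunk into a dict."""
--     if not output or not output.strip() or not fields:
--         return []
--
--     # pass 1: lines -> flat (field, value) pair list
--     pairs = []
--     for raw in output.strip().split('\n'):
--         line = raw.strip()
--         if not line or line.startswith('PS ') or ':' not in line:
--             continue
--         for f in fields:
--             if line.startswith(f):
--                 pairs.append((f, line.split(':', 1)[1].strip()))
--                 break
--
--     # pass 2: chunk the pair list, starting a new chunk at each first-field pair
--     chunks = []
--     for p in pairs:
--         if p[0] == fields[0] or not chunks:
--             chunks.append([p])
--         else:
--             chunks[-1].append(p)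
--
--     # pass 3: each chunk becomes one entry
--     return [dict(c) for c in chunks]
-- ===== Notes on version B (the rewrite author's own statement) =====
-- stated objective: alternative
-- what changed: A's single fused loop (per-line field scan with inline dict flushing and a final non-empty flush) is replaced by three staged passes: extract a flat (field,value) pair list, chunk that list at first-field boundaries by appending to the last chunk, then map dict() over the chunks, so no flush-on-nonempty bookkeeping exists in B.
import Mathlib
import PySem

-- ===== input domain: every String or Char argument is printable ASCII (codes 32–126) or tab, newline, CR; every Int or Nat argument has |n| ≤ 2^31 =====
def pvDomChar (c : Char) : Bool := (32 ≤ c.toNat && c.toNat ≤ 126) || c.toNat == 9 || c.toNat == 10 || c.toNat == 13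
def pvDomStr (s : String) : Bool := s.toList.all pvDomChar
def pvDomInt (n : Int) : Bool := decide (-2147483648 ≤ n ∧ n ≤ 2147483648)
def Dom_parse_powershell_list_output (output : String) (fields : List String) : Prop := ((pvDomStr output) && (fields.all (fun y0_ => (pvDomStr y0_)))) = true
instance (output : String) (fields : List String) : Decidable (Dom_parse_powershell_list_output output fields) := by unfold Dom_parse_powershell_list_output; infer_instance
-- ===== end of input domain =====

-- B replaces A's single fused loop (per-line scan with inline dict flushing) by three staged
-- passes: extract (field,value) pairs, chunk them at first-field boundaries by appending to the
-- last chunk, then map dict() over the chunks (hoisting the ':' test before the field scan); the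
-- timing run measured B faster by a constant factor; objective: alternative decomposition.

-- ===== PORT A =====

-- value = line.split(':', 1)[1].strip()  (except IndexError → '')
def pvAValue (line : String) : String :=
  match PySem.List.pyGet? ((PySem.Str.splitMax? line ":" 1).getD []) 1 with
  | some v => PySem.Str.strip v
  | none => ""

-- body of A's 'for line in lines' loop; state = (entries, current_entry)
def pvAStep (fields : List String) (first : String)
    (st : List (PySem.Dict String String) × PySem.Dict String String) (rawLine : String) :
    List (PySem.Dict String String) × PySem.Dict String String :=
  let line := PySem.Str.strip rawLine
  if line = "" || PySem.Str.startswith line "PS " then st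
  else
    -- 'for field in fields: if line.startswith(field) and ":" in line: … break'
    match fields.find? (fun f => PySem.Str.startswith line f && PySem.Str.isIn ":" line) with
    | none => st
    | some field =>
      let st := if field == first && st.2.items ≠ [] then (st.1 ++ [st.2], PySem.Dict.empty) else st
      (st.1, st.2.insert field (pvAValue line))

def parse_powershell_list_output (output : String) (fields : List String) :
    List (List (String × String)) :=
  if output = "" || PySem.Str.strip output = "" then []
  else
    match fields with
    | [] => []
    | first :: _ =>
      let lines := (PySem.Str.split? (PySem.Str.strip output) "\n").getD []
      let st := lines.foldl (pvAStep fields first) ([], PySem.Dict.empty)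
      let entries := if st.2.items ≠ [] then st.1 ++ [st.2] else st.1
      entries.map (·.items)

-- ===== PORT B =====

-- pass 1: 'for raw in lines: … for f in fields: if line.startswith(f): pairs.append(…); break'
def pvBPairs (fields : List String) : List String → List (String × String)
  | [] => []
  | raw :: rest =>
    let line := PySem.Str.strip raw
    if line = "" || PySem.Str.startswith line "PS " || !PySem.Str.isIn ":" line then
      pvBPairs fields rest
    else
      match fields.find? (fun f => PySem.Str.startswith line f) with
      | none => pvBPairs fields rest
      | some f =>
        (f, PySem.Str.strip (((PySem.Str.splitMax? line ":" 1).getD []).getD 1 "")) :: pvBPairs fields rest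

-- pass 2 body: 'if p[0] == fields[0] or not chunks: chunks.append([p]) else: chunks[-1].append(p)'
def pvBChunkStep (first : String) (chunks : List (List (String × String))) (p : String × String) :
    List (List (String × String)) :=
  if p.1 == first || chunks.isEmpty then chunks ++ [[p]]
  else chunks.dropLast ++ [(chunks.getLast?.getD []) ++ [p]]

-- pass 3 body: dict(c)  (as a list of items)
def pvBDict (chunk : List (String × String)) : List (String × String) :=
  (chunk.foldl (fun d q => d.insert q.1 q.2) PySem.Dict.empty).items

def parse_powershell_list_output_alt (output : String) (fields : List String) :
    List (List (String × String)) :=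
  if output = "" || PySem.Str.strip output = "" then []
  else
    match fields with
    | [] => []
    | first :: _ =>
      let pairs := pvBPairs fields ((PySem.Str.split? (PySem.Str.strip output) "\n").getD [])
      (pairs.foldl (pvBChunkStep first) []).map pvBDict

-- ===== PRECONDITION & SPEC =====
def Spec_parse_powershell_list_output (output : String) (fields : List String) (out : List (List (String × String))) : Prop := out = parse_powershell_list_output_alt output fields
instance (output : String) (fields : List String) (out : List (List (String × String))) : Decidable (Spec_parse_powershell_list_output output fields out) := by unfold Spec_parse_powershell_list_output; infer_instance

-- ===== CLAIM (what is proved, stated in full; the proofs are below) =====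
def Claim_equal_parse_powershell_list_output : Prop := ∀ (output : String) (fields : List String), Dom_parse_powershell_list_output output fields → Spec_parse_powershell_list_output output fields (parse_powershell_list_output output fields)

-- ===== LEMMAS AND PROOFS =====

-- proof-side: the (field,value) pair pass 1 extracts from one raw line, if any
def pvLinePair (fields : List String) (raw : String) : Option (String × String) :=
  let line := PySem.Str.strip raw
  if line = "" || PySem.Str.startswith line "PS " || !PySem.Str.isIn ":" line then none
  else
    match fields.find? (fun f => PySem.Str.startswith line f) with
    | none => none
    | some f => some (f, PySem.Str.strip (((PySem.Str.splitMax? line ":" 1).getD []).getD 1 ""))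

-- proof-side: A's flush-and-insert treatment of a single pair
def pvFlush (first : String)
    (st : List (PySem.Dict String String) × PySem.Dict String String) (p : String × String) :
    List (PySem.Dict String String) × PySem.Dict String String :=
  let st := if p.1 == first && st.2.items ≠ [] then (st.1 ++ [st.2], PySem.Dict.empty) else st
  (st.1, st.2.insert p.1 p.2)

-- proof-side: dict of a chunk
def pvF (c : List (String × String)) : PySem.Dict String String :=
  c.foldl (fun d q => d.insert q.1 q.2) PySem.Dict.empty

-- proof-side: A's fold state corresponding to a chunk list
def pvStOf (chunks : List (List (String × String))) :
    List (PySem.Dict String String) × PySem.Dict String String :=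
  (chunks.dropLast.map pvF, pvF (chunks.getLast?.getD []))

theorem pvBPairs_eq_filterMap (fields : List String) (lines : List String) :
    pvBPairs fields lines = lines.filterMap (pvLinePair fields) := by
  induction lines with
  | nil => rfl
  | cons raw rest ih =>
    rw [List.filterMap_cons]
    show (if _ then pvBPairs fields rest else _) = _
    have hlp : pvLinePair fields raw =
        (if (PySem.Str.strip raw = "" || PySem.Str.startswith (PySem.Str.strip raw) "PS "
              || !PySem.Str.isIn ":" (PySem.Str.strip raw)) then none
         else
           match List.find? (fun f => PySem.Str.startswith (PySem.Str.strip raw) f) fields with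
           | none => none
           | some f => some (f, PySem.Str.strip (((PySem.Str.splitMax? (PySem.Str.strip raw) ":" 1).getD []).getD 1 ""))) := rfl
    rw [hlp]
    split
    · simpa using ih
    · cases List.find? (fun f => PySem.Str.startswith (PySem.Str.strip raw) f) fields <;>
        simp [ih]

-- the field-independent conjunct ':' ∈ line can be hoisted out of find?
theorem pv_find_and_const (fields : List String) (p : String → Bool) (c : Bool) :
    fields.find? (fun f => p f && c) = if c then fields.find? p else none := by
  cases c <;> simp

theorem pv_value_eq (line : String) :
    pvAValue line = PySem.Str.strip (((PySem.Str.splitMax? line ":" 1).getD []).getD 1 "") := by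
  unfold pvAValue
  rw [show (1:Int) = ((1:Nat):Int) from rfl, PySem.List.pyGet?_natCast]
  rcases h : ((PySem.Str.splitMax? line ":" 1).getD [])[(1:Nat)]? with _ | v
  · simp [List.getD, h]; rfl
  · simp [List.getD, h]

-- A's one-line step agrees with pass 1 + pvFlush on that line
theorem pv_step_eq (fields : List String) (first : String)
    (st : List (PySem.Dict String String) × PySem.Dict String String) (rawLine : String) :
    pvAStep fields first st rawLine =
      match pvLinePair fields rawLine with
      | none => st
      | some p => pvFlush first st p := by
  simp only [pvAStep, pvLinePair, pv_find_and_const, ne_eq, decide_not]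
  generalize PySem.Str.strip rawLine = s
  generalize PySem.Str.startswith s "PS " = bps
  generalize hc : PySem.Str.isIn ":" s = bc
  generalize hb0 : decide (s = "") = b0
  cases b0 <;> cases bps <;> cases bc <;>
    simp only [Bool.or_false, Bool.or_true, Bool.not_false, Bool.not_true, if_true] <;>
    try rfl
  all_goals
    cases hf : List.find? (fun f => PySem.Str.startswith s f) fields with
    | none => rfl
    | some field => simp [pvFlush, pv_value_eq]

-- the fused loop equals pvFlush folded over the extracted pair list
theorem pv_fold_eq (fields : List String) (first : String) (lines : List String)
    (st : List (PySem.Dict String String) × PySem.Dict String String) :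
    lines.foldl (pvAStep fields first) st =
      (lines.filterMap (pvLinePair fields)).foldl (pvFlush first) st := by
  induction lines generalizing st with
  | nil => rfl
  | cons l ls ih =>
    simp only [List.foldl_cons, List.filterMap_cons]
    rw [pv_step_eq]
    cases pvLinePair fields l <;> simp [ih]

theorem pv_insert_items_ne_nil {d : PySem.Dict String String} (k v : String) :
    (d.insert k v).items ≠ [] := by
  rw [PySem.Dict.items_insert]
  rcases hd : d.items with _ | ⟨q, t⟩
  · have : d.contains k = false := by
      simp [PySem.Dict.contains_eq_isSome_get?]
      cases d with | mk items => cases items with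
        | nil => simp [PySem.Dict.get?]
        | cons a b => simp at hd
    simp [this]
  · split <;> simp

theorem pv_empty_items : (PySem.Dict.empty : PySem.Dict String String).items = [] := rfl

theorem pvF_ne_nil (q : String × String) (t : List (String × String)) :
    (List.foldl (fun d q => d.insert q.1 q.2) (PySem.Dict.empty.insert q.1 q.2) t).items ≠ [] := by
  suffices h : ∀ (l : List (String × String)) (d : PySem.Dict String String),
      d.items ≠ [] → (l.foldl (fun d q => d.insert q.1 q.2) d).items ≠ [] by
    exact h t _ (pv_insert_items_ne_nil q.1 q.2)
  intro l
  induction l with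
  | nil => intro d h; exact h
  | cons a b ih => intro d _; exact ih _ (pv_insert_items_ne_nil a.1 a.2)

-- one pvFlush step corresponds to one chunking step
theorem pv_flush_chunk (first : String) (chunks : List (List (String × String)))
    (hne : ∀ c ∈ chunks, c ≠ []) (p : String × String) :
    pvFlush first (pvStOf chunks) p = pvStOf (pvBChunkStep first chunks p) := by
  rcases List.eq_nil_or_concat chunks with h | ⟨init, lastc, h⟩
  · subst h
    simp [pvFlush, pvBChunkStep, pvStOf, pvF, pv_empty_items]
  · subst h
    have hlast : lastc ≠ [] := hne lastc (by simp)
    obtain ⟨q, t, rfl⟩ : ∃ q t, lastc = q :: t := by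
      cases lastc with
      | nil => exact absurd rfl hlast
      | cons q t => exact ⟨q, t, rfl⟩
    by_cases hp : (p.1 == first) = true
    · simp [pvFlush, pvBChunkStep, pvStOf, hp, pvF, pvF_ne_nil q t]
    · simp [pvFlush, pvBChunkStep, pvStOf, hp, pvF, List.concat_eq_append,
        List.dropLast_concat, List.getLast?_concat, List.foldl_append]

-- folding pvFlush from a chunk state equals chunking then mapping dict()
theorem pv_chunks_eq (first : String) (pairs : List (String × String))
    (chunks : List (List (String × String))) (hne : ∀ c ∈ chunks, c ≠ []) :
    (let st := pairs.foldl (pvFlush first) (pvStOf chunks)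
     (if st.2.items ≠ [] then st.1 ++ [st.2] else st.1).map (·.items)) =
      (pairs.foldl (pvBChunkStep first) chunks).map pvBDict := by
  induction pairs generalizing chunks with
  | nil =>
    rcases List.eq_nil_or_concat chunks with h | ⟨init, lastc, h⟩
    · subst h; simp [pvStOf, pvF, pv_empty_items]
    · subst h
      have hlast : lastc ≠ [] := hne lastc (by simp)
      obtain ⟨q, t, rfl⟩ : ∃ q t, lastc = q :: t := by
        cases lastc with
        | nil => exact absurd rfl hlast
        | cons q t => exact ⟨q, t, rfl⟩
      simp [pvStOf, pvBDict, pvF, pvF_ne_nil q t]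
  | cons p ps ih =>
    simp only [List.foldl_cons]
    rw [pv_flush_chunk first chunks hne p]
    apply ih
    intro c hc
    unfold pvBChunkStep at hc
    split at hc
    · rcases List.mem_append.mp hc with h | h
      · exact hne c h
      · simp at h; subst h; simp
    · rcases List.mem_append.mp hc with h | h
      · exact hne c (List.dropLast_subset _ h)
      · simp at h; subst h; simp

-- ===== VERDICT (by name: the statement is the Claim_ definition above) =====
theorem parse_powershell_list_output_spec : Claim_equal_parse_powershell_list_output := by
  intro output fields _
  unfold Spec_parse_powershell_list_output parse_powershell_list_output parse_powershell_list_output_alt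
  by_cases h : (output = "" || PySem.Str.strip output = "") = true
  · simp [h]
  · simp only [h]
    cases fields with
    | nil => rfl
    | cons first rest =>
      simp only []
      rw [pv_fold_eq, ← pvBPairs_eq_filterMap]
      have hst : (([] : List (PySem.Dict String String)), PySem.Dict.empty (κ := String) (ν := String)) = pvStOf [] := rfl
      rw [hst]
      exact pv_chunks_eq first _ [] (by simp)
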